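-- pv_equiv track=rewrite | github.com/zhengezhao/CSC665FinalProject | final_project/createModel.py | filter_trainset
-- ===== SOURCE A (Python) =====
-- def filter_trainset(trainset,label):
--     count = 0
--     filtertrainset = []
--     for i in range(len(trainset)):
--         if trainset[i][1] == label and count <5000:
--             count+=1
--         else:
--             filtertrainset.append(trainset[i])
--     return filtertrainset
-- ===== SOURCE B (Python) =====
-- def filter_trainset(trainset, label):
--     matching = [i for i, item in enumerate(trainset) if item[1] == label]
--     drop = set(matching[:5000])
--     return [item for i, item in enumerate(trainset) if i not in drop]
-- ===== Notes on version B (the rewrite author's own statement) =====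
-- stated objective: alternative
-- what changed: B replaces A's single stateful loop (saturating counter + append) with two passes: it first computes the index list of matching items and takes the first 5000 as a drop set, then rebuilds the output by filtering enumerate(trainset) against that set.
import Mathlib
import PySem

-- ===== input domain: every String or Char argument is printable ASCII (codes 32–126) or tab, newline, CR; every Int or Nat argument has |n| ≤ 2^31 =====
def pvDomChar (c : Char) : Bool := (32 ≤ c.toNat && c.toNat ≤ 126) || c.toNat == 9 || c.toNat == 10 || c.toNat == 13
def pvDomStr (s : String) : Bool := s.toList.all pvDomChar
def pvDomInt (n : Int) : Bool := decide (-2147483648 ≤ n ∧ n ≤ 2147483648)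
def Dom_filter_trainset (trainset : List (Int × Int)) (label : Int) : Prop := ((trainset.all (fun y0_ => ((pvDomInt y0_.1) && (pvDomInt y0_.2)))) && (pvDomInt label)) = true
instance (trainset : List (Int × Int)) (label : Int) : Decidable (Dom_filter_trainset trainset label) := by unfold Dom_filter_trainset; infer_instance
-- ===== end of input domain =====

-- B recomputes A's result in two passes (index list of matches, then a filter against its first 5000 entries); alternative decomposition, same cost.


-- ===== PORT A =====
-- loop body of A: 'if trainset[i][1] == label and count < 5000: count += 1 else: filtertrainset.append(trainset[i])'
def pvStepA (label : Int) (st : Int × List (Int × Int)) (x : Int × Int) : Int × List (Int × Int) :=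
  if x.2 == label && decide (st.1 < 5000) then (st.1 + 1, st.2) else (st.1, st.2 ++ [x])

def filter_trainset (trainset : List (Int × Int)) (label : Int) : List (Int × Int) :=
  ((PySem.List.pyRange 0 (trainset.length : Int) 1).foldl
      (fun st i => pvStepA label st (PySem.List.pyGetD trainset i (0, 0))) ((0 : Int), [])).2

-- ===== PORT B =====
def filter_trainset_alt (trainset : List (Int × Int)) (label : Int) : List (Int × Int) :=
  let matching : List Int :=
    ((PySem.List.enumerate trainset 0).filter (fun p => p.2.2 == label)).map (·.1)
  let drop : PySem.Set Int := PySem.Set.ofList (PySem.List.slice matching none (some 5000))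
  ((PySem.List.enumerate trainset 0).filter (fun p => !(PySem.Set.contains drop p.1))).map (·.2)

-- ===== PRECONDITION & SPEC =====
def Spec_filter_trainset (trainset : List (Int × Int)) (label : Int) (out : List (Int × Int)) : Prop := out = filter_trainset_alt trainset label
instance (trainset : List (Int × Int)) (label : Int) (out : List (Int × Int)) : Decidable (Spec_filter_trainset trainset label out) := by unfold Spec_filter_trainset; infer_instance

-- ===== CLAIM (what is proved, stated in full; the proofs are below) =====
def Claim_equal_filter_trainset : Prop := ∀ (trainset : List (Int × Int)) (label : Int), Dom_filter_trainset trainset label → Spec_filter_trainset trainset label (filter_trainset trainset label)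

-- ===== LEMMAS AND PROOFS =====

-- reference: keep everything except the first k matches
def pvRef (label : Int) : List (Int × Int) → Nat → List (Int × Int)
  | [], _ => []
  | x :: t, 0 => x :: pvRef label t 0
  | x :: t, (k+1) => if x.2 == label then pvRef label t k else x :: pvRef label t (k+1)

def pvMatchIdx (label : Int) (xs : List (Int × Int)) (s : Int) : List Int :=
  ((PySem.List.enumerate xs s).filter (fun p => p.2.2 == label)).map (·.1)

def pvKeep (drop : List Int) (xs : List (Int × Int)) (s : Int) : List (Int × Int) :=
  ((PySem.List.enumerate xs s).filter (fun p => !(drop.contains p.1))).map (·.2)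

lemma pvMatchIdx_cons (label : Int) (x : Int × Int) (t : List (Int × Int)) (s : Int) :
    pvMatchIdx label (x :: t) s =
      if x.2 == label then s :: pvMatchIdx label t (s+1) else pvMatchIdx label t (s+1) := by
  by_cases h : x.2 == label <;>
    simp [pvMatchIdx, PySem.List.enumerate_cons, h]

lemma pvKeep_cons (d : List Int) (x : Int × Int) (t : List (Int × Int)) (s : Int) :
    pvKeep d (x :: t) s =
      (if d.contains s then ([] : List (Int × Int)) else [x]) ++ pvKeep d t (s+1) := by
  by_cases h : s ∈ d <;>
    simp [pvKeep, PySem.List.enumerate_cons, List.contains_eq_mem, h]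

lemma pvMatchIdx_ge (label : Int) (xs : List (Int × Int)) (s : Int) :
    ∀ j ∈ pvMatchIdx label xs s, s ≤ j := by
  intro j hj
  simp only [pvMatchIdx, List.mem_map, List.mem_filter] at hj
  obtain ⟨p, ⟨hp, _⟩, rfl⟩ := hj
  rw [PySem.List.mem_enumerate_iff] at hp
  obtain ⟨k, hk, rfl⟩ := hp
  simp

-- dropping an index smaller than every position does not change the filter
lemma pvKeep_cons_lt (d : List Int) (j : Int) (xs : List (Int × Int)) (s : Int) (hj : j < s) :
    pvKeep (j :: d) xs s = pvKeep d xs s := by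
  unfold pvKeep
  congr 1
  apply List.filter_congr
  intro p hp
  rw [PySem.List.mem_enumerate_iff] at hp
  obtain ⟨k, hk, rfl⟩ := hp
  have hne : s + (k : Int) ≠ j := by omega
  simp [List.contains_eq_mem, hne]

lemma pvKeep_take (label : Int) :
    ∀ (xs : List (Int × Int)) (s : Int) (k : Nat),
      pvKeep ((pvMatchIdx label xs s).take k) xs s = pvRef label xs k := by
  intro xs
  induction xs with
  | nil => intro s k; simp [pvKeep, pvRef, PySem.List.enumerate_nil]
  | cons x t ih =>
    intro s k
    by_cases hm : x.2 == label
    · rw [pvMatchIdx_cons, if_pos hm]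
      cases k with
      | zero =>
        rw [List.take_zero, pvKeep_cons]
        have h0 := ih (s+1) 0
        rw [List.take_zero] at h0
        simp [pvRef, h0]
      | succ k' =>
        rw [List.take_succ_cons, pvKeep_cons]
        have hc : (s :: (pvMatchIdx label t (s+1)).take k').contains s = true := by
          simp
        rw [if_pos hc, List.nil_append]
        rw [pvKeep_cons_lt _ _ _ _ (by omega), ih (s+1) k']
        simp [pvRef, hm]
    · rw [pvMatchIdx_cons, if_neg hm]
      have hns : ¬ ((pvMatchIdx label t (s+1)).take k).contains s = true := by
        rw [List.contains_eq_mem]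
        simp only [decide_eq_true_eq]
        intro hmem
        have := pvMatchIdx_ge label t (s+1) s (List.mem_of_mem_take hmem)
        omega
      rw [pvKeep_cons, if_neg hns, ih (s+1) k]
      cases k <;> simp [pvRef, hm]

lemma pvFoldA (label : Int) :
    ∀ (xs : List (Int × Int)) (c : Int) (acc : List (Int × Int)), 0 ≤ c →
      (xs.foldl (pvStepA label) (c, acc)).2 = acc ++ pvRef label xs (5000 - c).toNat := by
  intro xs
  induction xs with
  | nil => intro c acc _; simp [pvRef]
  | cons x t ih =>
    intro c acc hc
    by_cases hm : x.2 == label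
    · by_cases hlt : c < 5000
      · have hstep : pvStepA label (c, acc) x = (c + 1, acc) := by
          simp [pvStepA, hm, hlt]
        rw [List.foldl_cons, hstep, ih (c+1) acc (by omega)]
        have hk : (5000 - c).toNat = (5000 - (c+1)).toNat + 1 := by omega
        rw [hk]
        simp [pvRef, hm]
      · have hstep : pvStepA label (c, acc) x = (c, acc ++ [x]) := by
          simp [pvStepA, hlt]
        rw [List.foldl_cons, hstep, ih c (acc ++ [x]) hc]
        have hk : (5000 - c).toNat = 0 := by omega
        rw [hk]
        simp [pvRef]
    · have hstep : pvStepA label (c, acc) x = (c, acc ++ [x]) := by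
        simp [pvStepA, hm]
      rw [List.foldl_cons, hstep, ih c (acc ++ [x]) hc]
      cases hk : (5000 - c).toNat <;> simp [pvRef, hm]

lemma pvA_eq (trainset : List (Int × Int)) (label : Int) :
    filter_trainset trainset label = pvRef label trainset 5000 := by
  unfold filter_trainset
  rw [PySem.List.foldl_pyRange_zero_pyGetD' trainset (0,0) (pvStepA label) ((0 : Int), [])]
  simpa using pvFoldA label trainset 0 [] (by omega)

lemma pvContains_ofList (d : List Int) (x : Int) :
    (PySem.Set.ofList d).contains x = d.contains x := by
  by_cases h : x ∈ d
  · have h1 : x ∈ PySem.Set.ofList d := (PySem.Set.mem_ofList d x).2 h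
    simp [List.contains_eq_mem, h, h1]
  · have h1 : x ∉ PySem.Set.ofList d := fun hx => h ((PySem.Set.mem_ofList d x).1 hx)
    simp [List.contains_eq_mem, h, h1]

lemma pvB_eq (trainset : List (Int × Int)) (label : Int) :
    filter_trainset_alt trainset label = pvRef label trainset 5000 := by
  have hslice : PySem.List.slice (pvMatchIdx label trainset 0) none (some 5000)
      = (pvMatchIdx label trainset 0).take 5000 := by
    simpa using PySem.List.slice_to (pvMatchIdx label trainset 0) (b := 5000) (by norm_num)
  show ((PySem.List.enumerate trainset 0).filter
      (fun p => !((PySem.Set.ofList (PySem.List.slice (pvMatchIdx label trainset 0) none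
        (some 5000))).contains p.1))).map (·.2) = pvRef label trainset 5000
  rw [hslice, ← pvKeep_take label trainset 0 5000]
  unfold pvKeep
  congr 1
  apply List.filter_congr
  intro p _
  rw [pvContains_ofList]

-- ===== VERDICT (by name: the statement is the Claim_ definition above) =====
theorem filter_trainset_spec : Claim_equal_filter_trainset := by
  intro trainset label _
  unfold Spec_filter_trainset
  rw [pvA_eq, pvB_eq]
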